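-- pv_equiv track=rewrite | github.com/SammyJdot/passwdpwn | passwdpwn.py | generate_variants
-- ===== SOURCE A (Python) =====
-- special_chars = ['@', '#', '$', '%', '^', '&', '*', '!', '?', '_', '-', '=', '+']
--
-- leet_map = {
--     'a': ['a', '@', '4'],
--     'e': ['e', '3'],
--     'i': ['i', '1', '!'],
--     'o': ['o', '0'],
--     's': ['s', '$', '5'],
--     't': ['t', '7']
-- }
--
-- def leetify(word):
--     combos = set()
--     def helper(idx, current):
--         if idx == len(word):
--             combos.add(''.join(current))
--             return
--         char = word[idx].lower()
--         subs = leet_map.get(char, [word[idx]])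
--         for s in subs:
--             helper(idx + 1, current + [s])
--     helper(0, [])
--     return combos
--
-- def generate_variants(word):
--     variants = set()
--     base_forms = {word, word.lower(), word.upper(), word.capitalize()}
--     for form in base_forms:
--         variants.add(form)
--         for c in special_chars:
--             variants.add(form + c)
--             variants.add(c + form)
--         variants.update(leetify(form))
--     return variants
-- ===== SOURCE B (Python) =====
-- import itertools
--
-- special_chars = ['@', '#', '$', '%', '^', '&', '*', '!', '?', '_', '-', '=', '+']
--
-- leet_map = {
--     'a': ['a', '@', '4'],
--     'e': ['e', '3'],
--     'i': ['i', '1', '!'],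
--     'o': ['o', '0'],
--     's': ['s', '$', '5'],
--     't': ['t', '7']
-- }
--
-- def leetify(word):
--     # precompute each position's options, then take the cartesian product
--     opts = [leet_map.get(ch.lower(), [ch]) for ch in word]
--     return {''.join(t) for t in itertools.product(*opts)}
--
-- def one_form(form):
--     return ([form]
--             + [x for c in special_chars for x in (form + c, c + form)]
--             + list(leetify(form)))
--
-- def generate_variants(word):
--     forms = {word, word.lower(), word.upper(), word.capitalize()}
--     return set(x for form in forms for x in one_form(form))
-- ===== Notes on version B (the rewrite author's own statement) =====
-- stated objective: idiomatic
-- what changed: The recursive accumulator-mutating depth-first helper and the nested imperative set-building loops are replaced by itertools.product over precomputed per-position option lists and a single flat set comprehension over per-form candidate lists.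
import Mathlib
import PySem

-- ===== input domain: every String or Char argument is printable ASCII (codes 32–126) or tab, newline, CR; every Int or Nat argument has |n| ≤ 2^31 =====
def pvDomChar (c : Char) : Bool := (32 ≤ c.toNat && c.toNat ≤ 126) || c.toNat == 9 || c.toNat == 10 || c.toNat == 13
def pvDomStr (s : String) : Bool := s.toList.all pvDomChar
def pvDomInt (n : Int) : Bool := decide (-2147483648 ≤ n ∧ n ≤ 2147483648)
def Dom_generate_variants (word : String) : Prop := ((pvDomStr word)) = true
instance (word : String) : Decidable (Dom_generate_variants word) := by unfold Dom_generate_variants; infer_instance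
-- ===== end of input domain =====

-- B replaces the recursive depth-first leetify helper by a cartesian product over
-- precomputed per-position option lists, and the nested imperative set-building loops
-- by one flat set comprehension over per-form candidate lists; objective: idiomatic.
-- Python A/B iterate over sets only to build another set, so the result is order-insensitive.

-- shared module constants (special_chars and leet_map from the Python module)
def pvSpecialChars : List Char :=
  ['@', '#', '$', '%', '^', '&', '*', '!', '?', '_', '-', '=', '+']

-- leet_map.get(k, dflt): substitution strings are single characters, modelled as Char
def pvLeetGet (k : Char) (dflt : List Char) : List Char :=
  if k = 'a' then ['a', '@', '4']
  else if k = 'e' then ['e', '3']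
  else if k = 'i' then ['i', '1', '!']
  else if k = 'o' then ['o', '0']
  else if k = 's' then ['s', '$', '5']
  else if k = 't' then ['t', '7']
  else dflt

-- word.capitalize() (exact on the ASCII domain): first char uppercased, rest lowercased
def pvCapitalize (s : String) : String :=
  match s.toList with
  | [] => s
  | c :: rest => String.mk (PySem.Chars.upperChar c :: PySem.Chars.lower rest)

-- ===== PORT A =====
-- leetify's inner 'helper(idx, current)': recursion over the remaining characters,
-- 'current + [s]' accumulates the chosen substitutions, combos.add at the end
def pvHelperA : List Char → List Char → PySem.Set String → PySem.Set String
  | [], current, combos => PySem.Set.add combos (String.mk current)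
  | ch :: rest, current, combos =>
      (pvLeetGet (PySem.Chars.lowerChar ch) [ch]).foldl
        (fun acc s => pvHelperA rest (current ++ [s]) acc) combos
termination_by rest _ _ => rest.length

def pvLeetifyA (word : String) : PySem.Set String :=
  pvHelperA word.toList [] PySem.Set.empty

def generate_variants (word : String) : List String :=
  (PySem.Set.ofList [word, PySem.Str.lower word, PySem.Str.upper word, pvCapitalize word]).foldl
    (fun variants form =>
      PySem.Set.update
        (pvSpecialChars.foldl
          (fun v c =>
            PySem.Set.add (PySem.Set.add v (String.mk (form.toList ++ [c])))
              (String.mk (c :: form.toList)))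
          (PySem.Set.add variants form))
        (pvLeetifyA form))
    PySem.Set.empty

-- ===== PORT B =====
-- itertools.product(*opts): all ways to pick one option per position, first position major
def pvProduct : List (List Char) → List (List Char)
  | [] => [[]]
  | o :: rest => o.flatMap (fun s => (pvProduct rest).map (s :: ·))

-- B's leetify: per-position option lists, then the cartesian product, joined
def pvLeetifyB (word : String) : PySem.Set String :=
  PySem.Set.ofList
    ((pvProduct (word.toList.map (fun ch => pvLeetGet (PySem.Chars.lowerChar ch) [ch]))).map String.mk)

-- one_form(form): the flat candidate list contributed by one base form
def pvOneForm (form : String) : List String :=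
  form ::
    (pvSpecialChars.flatMap
      (fun c => [String.mk (form.toList ++ [c]), String.mk (c :: form.toList)]))
    ++ pvLeetifyB form

def generate_variants_alt (word : String) : List String :=
  PySem.Set.ofList
    ((PySem.Set.ofList [word, PySem.Str.lower word, PySem.Str.upper word, pvCapitalize word]).flatMap
      pvOneForm)

-- ===== PRECONDITION & SPEC =====
def Spec_generate_variants (word : String) (out : List String) : Prop := out = generate_variants_alt word
instance (word : String) (out : List String) : Decidable (Spec_generate_variants word out) := by unfold Spec_generate_variants; infer_instance

-- ===== CLAIM (what is proved, stated in full; the proofs are below) =====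
def Claim_equal_generate_variants : Prop := ∀ (word : String), Dom_generate_variants word → Spec_generate_variants word (generate_variants word)

-- ===== LEMMAS AND PROOFS =====

-- folding a per-element update is one update by the concatenation
theorem pv_foldl_update {α : Type} (subs : List α) (g : α → List String)
    (s : PySem.Set String) :
    subs.foldl (fun acc x => PySem.Set.update acc (g x)) s
      = PySem.Set.update s (subs.flatMap g) := by
  induction subs generalizing s with
  | nil => simp [PySem.Set.update]
  | cons a t ih =>
      simp only [List.foldl_cons, List.flatMap_cons]
      rw [ih]
      simp [PySem.Set.update, List.foldl_append]

-- A's DFS helper enumerates exactly the product, prefixed by 'current'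
theorem pvHelperA_eq (rest : List Char) :
    ∀ (current : List Char) (combos : PySem.Set String),
      pvHelperA rest current combos
        = PySem.Set.update combos
            ((pvProduct (rest.map (fun ch => pvLeetGet (PySem.Chars.lowerChar ch) [ch]))).map
              (fun t => String.mk (current ++ t))) := by
  induction rest with
  | nil =>
      intro current combos
      simp [pvHelperA, pvProduct, PySem.Set.update]
  | cons ch rest ih =>
      intro current combos
      rw [pvHelperA]
      simp only [ih]
      have h := pv_foldl_update (pvLeetGet (PySem.Chars.lowerChar ch) [ch])
        (fun s => (pvProduct (rest.map (fun c => pvLeetGet (PySem.Chars.lowerChar c) [c]))).map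
          (fun t => String.mk ((current ++ [s]) ++ t))) combos
      simp only [h]
      congr 1
      simp [pvProduct, List.map_flatMap, List.map_map, Function.comp_def]

theorem pvLeetify_eq (word : String) : pvLeetifyA word = pvLeetifyB word := by
  unfold pvLeetifyA pvLeetifyB
  rw [pvHelperA_eq]
  simp [PySem.Set.update, PySem.Set.ofList_eq_foldl, PySem.Set.empty]

-- Set.add is a one-element update
theorem pv_add_eq_update (s : PySem.Set String) (x : String) :
    PySem.Set.add s x = PySem.Set.update s [x] := by
  simp [PySem.Set.update]

-- A's inner special-chars loop, flattened
theorem pv_inner_eq (form : String) (v : PySem.Set String) :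
    pvSpecialChars.foldl
        (fun v c =>
          PySem.Set.add (PySem.Set.add v (String.mk (form.toList ++ [c])))
            (String.mk (c :: form.toList))) v
      = PySem.Set.update v
          (pvSpecialChars.flatMap
            (fun c => [String.mk (form.toList ++ [c]), String.mk (c :: form.toList)])) := by
  have hf : (fun (v : PySem.Set String) (c : Char) =>
      PySem.Set.add (PySem.Set.add v (String.mk (form.toList ++ [c])))
        (String.mk (c :: form.toList)))
      = (fun (v : PySem.Set String) (c : Char) =>
          PySem.Set.update v [String.mk (form.toList ++ [c]), String.mk (c :: form.toList)]) := by
    funext v c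
    simp [PySem.Set.update]
  rw [hf, pv_foldl_update]

-- one iteration of A's outer loop appends one_form, as a single update
theorem pv_step_eq (variants : PySem.Set String) (form : String) :
    PySem.Set.update
        (pvSpecialChars.foldl
          (fun v c =>
            PySem.Set.add (PySem.Set.add v (String.mk (form.toList ++ [c])))
              (String.mk (c :: form.toList)))
          (PySem.Set.add variants form))
        (pvLeetifyA form)
      = PySem.Set.update variants (pvOneForm form) := by
  rw [pv_inner_eq, pv_add_eq_update, pvLeetify_eq]
  unfold pvOneForm
  simp [PySem.Set.update, List.foldl_append]

-- ===== VERDICT (by name: the statement is the Claim_ definition above) =====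
theorem generate_variants_spec : Claim_equal_generate_variants := by
  intro word _
  unfold Spec_generate_variants generate_variants generate_variants_alt
  have h1 : ∀ (forms : List String) (s : PySem.Set String),
      forms.foldl
          (fun variants form =>
            PySem.Set.update
              (pvSpecialChars.foldl
                (fun v c =>
                  PySem.Set.add (PySem.Set.add v (String.mk (form.toList ++ [c])))
                    (String.mk (c :: form.toList)))
                (PySem.Set.add variants form))
              (pvLeetifyA form)) s
        = PySem.Set.update s (forms.flatMap pvOneForm) := by
    intro forms s
    have hf : (fun (variants : PySem.Set String) (form : String) =>
        PySem.Set.update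
          (pvSpecialChars.foldl
            (fun v c =>
              PySem.Set.add (PySem.Set.add v (String.mk (form.toList ++ [c])))
                (String.mk (c :: form.toList)))
            (PySem.Set.add variants form))
          (pvLeetifyA form))
        = (fun (variants : PySem.Set String) (form : String) =>
            PySem.Set.update variants (pvOneForm form)) := by
      funext variants form
      exact pv_step_eq variants form
    rw [hf, pv_foldl_update]
  rw [h1]
  simp [PySem.Set.update, PySem.Set.ofList_eq_foldl, PySem.Set.empty]
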